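-- pv_equiv track=rewrite | github.com/jiangtianh/LeetCode | 3088-maximal-range-that-each-element-is-maximum-in-it/3088-maximal-range-that-each-element-is-maximum-in-it.py | maximumLengthOfRanges
-- ===== SOURCE A (Python) =====
-- from typing import List
--
-- def maximumLengthOfRanges(nums: List[int]) -> List[int]:
--     n = len(nums)
--     l = [0] * n
--     r = [0] * n
--
--     stack = []
--     for i in range(n):
--         num = nums[i]
--         while stack and stack[-1][1] < num:
--             stack.pop()
--         if stack:
--             l[i] = i - stack[-1][0] - 1
--         else:
--             l[i] = i
--         stack.append([i, num])
--
--     stack = []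
--     for i in range(n-1, -1, -1):
--         num = nums[i]
--         while stack and stack[-1][1] < num:
--             stack.pop()
--         if stack:
--             r[i] = stack[-1][0] - i - 1
--         else:
--             r[i] = n - i - 1
--         stack.append([i, num])
--
--     res = []
--     for i in range(n):
--         res.append(1 + l[i] + r[i])
--     return res
-- ===== SOURCE B (Python) =====
-- from typing import List
--
-- def maximumLengthOfRanges(nums: List[int]) -> List[int]:
--     n = len(nums)
--
--     def left(i):
--         c, j = 0, i - 1
--         while j >= 0 and nums[j] < nums[i]:
--             c += 1
--             j -= 1
--         return c
--
--     def right(i):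
--         c = 0
--         for v in nums[i + 1:]:
--             if not (v < nums[i]):
--                 break
--             c += 1
--         return c
--
--     return [1 + left(i) + right(i) for i in range(n)]
-- ===== Notes on version B (the rewrite author's own statement) =====
-- stated objective: simpler
-- what changed: Replaces the two monotonic-stack passes with l/r arrays by a direct per-index expansion: for each i count the run of strictly smaller neighbours to the left and to the right; no stacks or auxiliary arrays.
import Mathlib
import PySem

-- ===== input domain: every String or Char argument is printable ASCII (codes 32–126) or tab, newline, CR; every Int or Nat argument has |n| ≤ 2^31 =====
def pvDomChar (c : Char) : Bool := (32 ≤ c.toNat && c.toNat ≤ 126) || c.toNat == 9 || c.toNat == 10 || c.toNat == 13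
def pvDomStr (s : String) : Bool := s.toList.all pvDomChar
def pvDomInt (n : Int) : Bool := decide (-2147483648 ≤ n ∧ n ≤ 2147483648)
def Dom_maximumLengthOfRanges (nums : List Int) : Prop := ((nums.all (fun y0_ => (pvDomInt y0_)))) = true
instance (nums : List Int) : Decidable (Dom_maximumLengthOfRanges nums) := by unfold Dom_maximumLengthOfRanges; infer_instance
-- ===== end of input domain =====

-- B replaces A's two monotonic-stack passes by a direct per-index scan of the strictly
-- smaller neighbours on each side (simpler, no stacks/auxiliary arrays; not faster).

-- ===== PORT A =====
-- the inner 'while stack and stack[-1][1] < num: stack.pop()' (stack stored top-first)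
def popWA (stack : List (Int × Int)) (num : Int) : List (Int × Int) :=
  match stack with
  | [] => []
  | (j, v) :: rest => if v < num then popWA rest num else (j, v) :: rest

-- body of A's first loop (state = (l, stack))
def stepL (nums : List Int) (st : List Int × List (Int × Int)) (i : Int) :
    List Int × List (Int × Int) :=
  let num := PySem.List.pyGetD nums i 0
  let stack := popWA st.2 num
  let l := match stack with
    | (j, _) :: _ => PySem.List.pySetD st.1 i (i - j - 1)
    | [] => PySem.List.pySetD st.1 i i
  (l, (i, num) :: stack)

-- body of A's second loop (state = (r, stack))
def stepR (nums : List Int) (n : Int) (st : List Int × List (Int × Int)) (i : Int) :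
    List Int × List (Int × Int) :=
  let num := PySem.List.pyGetD nums i 0
  let stack := popWA st.2 num
  let r := match stack with
    | (j, _) :: _ => PySem.List.pySetD st.1 i (j - i - 1)
    | [] => PySem.List.pySetD st.1 i (n - i - 1)
  (r, (i, num) :: stack)

def maximumLengthOfRanges (nums : List Int) : List Int :=
  let n : Int := nums.length
  let l := ((PySem.List.pyRange 0 n 1).foldl (stepL nums) (List.replicate nums.length 0, [])).1
  let r := ((PySem.List.pyRange (n-1) (-1) (-1)).foldl (stepR nums n) (List.replicate nums.length 0, [])).1
  (PySem.List.pyRange 0 n 1).foldl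
    (fun res i => res ++ [1 + PySem.List.pyGetD l i 0 + PySem.List.pyGetD r i 0]) []

-- ===== PORT B =====
-- B's 'left(i)': walk j = i-1, i-2, … while nums[j] < x (argument k = j+1)
def scanLeft (nums : List Int) (x : Int) : Nat → Int
  | 0 => 0
  | k+1 => if nums.getD k 0 < x then scanLeft nums x k + 1 else 0

-- B's 'right(i)': walk along nums[i+1:] while the element is < x
def scanRight (x : Int) : List Int → Int
  | [] => 0
  | v :: rest => if v < x then scanRight x rest + 1 else 0

def maximumLengthOfRanges_alt (nums : List Int) : List Int :=
  (List.range nums.length).map (fun i =>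
    1 + scanLeft nums (nums.getD i 0) i + scanRight (nums.getD i 0) (nums.drop (i+1)))

-- ===== PRECONDITION & SPEC =====
def Spec_maximumLengthOfRanges (nums : List Int) (out : List Int) : Prop := out = maximumLengthOfRanges_alt nums
instance (nums : List Int) (out : List Int) : Decidable (Spec_maximumLengthOfRanges nums out) := by unfold Spec_maximumLengthOfRanges; infer_instance

-- ===== CLAIM (what is proved, stated in full; the proofs are below) =====
def Claim_equal_maximumLengthOfRanges : Prop := ∀ (nums : List Int), Dom_maximumLengthOfRanges nums → Spec_maximumLengthOfRanges nums (maximumLengthOfRanges nums)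

-- ===== LEMMAS AND PROOFS =====

-- canonical stack of A's left pass after processing indices 0..k-1 (top first)
def stkL (a : List Int) : Nat → List (Int × Int)
  | 0 => []
  | k+1 => ((k : Int), a.getD k 0) :: popWA (stkL a k) (a.getD k 0)

theorem popWA_popWA (s : List (Int × Int)) (y x : Int) (h : y ≤ x) :
    popWA (popWA s y) x = popWA s x := by
  induction s with
  | nil => simp [popWA]
  | cons p t ih =>
    obtain ⟨j, v⟩ := p
    by_cases hv : v < y
    · simp [popWA, hv, if_pos (lt_of_lt_of_le hv h), ih]
    · simp [popWA, hv]

-- popping only looks at the value component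
theorem popWA_map (f : Int → Int) (s : List (Int × Int)) (x : Int) :
    popWA (s.map (fun p => (f p.1, p.2))) x = (popWA s x).map (fun p => (f p.1, p.2)) := by
  induction s with
  | nil => simp [popWA]
  | cons p t ih =>
    obtain ⟨j, v⟩ := p
    by_cases hv : v < x <;> simp [popWA, hv, ih]

-- the heart: the stack's distance-to-top equals B's strictly-smaller run count
theorem stk_run (a : List Int) (k : Nat) (x : Int) :
    (match popWA (stkL a k) x with
     | [] => scanLeft a x k = (k : Int)
     | (j, _) :: _ => 0 ≤ j ∧ j < (k : Int) ∧ scanLeft a x k = (k : Int) - j - 1) := by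
  induction k generalizing x with
  | zero => simp [stkL, popWA, scanLeft]
  | succ k ih =>
    have hstk : popWA (stkL a (k+1)) x
        = if a.getD k 0 < x then popWA (popWA (stkL a k) (a.getD k 0)) x
          else ((k : Int), a.getD k 0) :: popWA (stkL a k) (a.getD k 0) := rfl
    have hscan : scanLeft a x (k+1) = if a.getD k 0 < x then scanLeft a x k + 1 else 0 := rfl
    by_cases hv : a.getD k 0 < x
    · rw [hstk, if_pos hv, popWA_popWA _ _ _ (le_of_lt hv)]
      have h := ih x
      revert h
      cases hpp : popWA (stkL a k) x with
      | nil =>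
        intro h
        simp only at h ⊢
        rw [hscan, if_pos hv, h]; push_cast; ring
      | cons p t =>
        obtain ⟨j, v⟩ := p
        rintro ⟨h0, h1, h2⟩
        refine ⟨h0, by push_cast at h1 ⊢; omega, ?_⟩
        rw [hscan, if_pos hv, h2]; push_cast; ring
    · rw [hstk, if_neg hv]
      refine ⟨Int.natCast_nonneg k, by push_cast; omega, ?_⟩
      rw [hscan, if_neg hv]; push_cast; ring

-- B's left count for index i
def Lval (nums : List Int) (i : Nat) : Int := scanLeft nums (nums.getD i 0) i
-- B's right count for index i, in left-scan-of-reverse form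
def Rval (nums : List Int) (i : Nat) : Int :=
  scanLeft nums.reverse (nums.getD i 0) (nums.length - 1 - i)

-- the l array after m iterations of A's first loop
def lList (nums : List Int) (m : Nat) : List Int :=
  (List.range nums.length).map (fun i => if i < m then Lval nums i else 0)
-- the r array after k iterations of A's second loop (indices n-1 … n-k filled)
def rList (nums : List Int) (k : Nat) : List Int :=
  (List.range nums.length).map (fun i => if nums.length - k ≤ i then Rval nums i else 0)

theorem lList_zero (nums : List Int) : lList nums 0 = List.replicate nums.length 0 := by
  unfold lList
  apply List.ext_getElem
  · simp
  · intro i h1 h2; simp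

theorem rList_zero (nums : List Int) : rList nums 0 = List.replicate nums.length 0 := by
  unfold rList
  apply List.ext_getElem
  · simp
  · intro i h1 h2
    simp only [List.getElem_map, List.getElem_range, List.getElem_replicate]
    rw [if_neg (by simp at h1; omega)]

theorem set_map_range {n : Nat} (f : Nat → Int) (m : Nat) (v : Int) (hm : m < n)
    (g : Nat → Int) (hg : ∀ i, i < n → (i ≠ m → g i = f i) ∧ (i = m → g i = v)) :
    ((List.range n).map f).set m v = (List.range n).map g := by
  apply List.ext_getElem
  · simp
  · intro i h1 h2
    simp only [List.getElem_set, List.getElem_map, List.getElem_range]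
    by_cases hi : i = m
    · subst hi; simp [(hg i (by simpa using h1)).2 rfl]
    · rw [if_neg (fun h => hi h.symm), (hg i (by simpa using h1)).1 hi]

theorem lList_set (nums : List Int) (m : Nat) (hm : m < nums.length) (v : Int)
    (hv : v = Lval nums m) : (lList nums m).set m v = lList nums (m+1) := by
  unfold lList
  refine set_map_range _ m v hm _ (fun i hi => ⟨fun hne => ?_, fun he => ?_⟩)
  · rcases Nat.lt_or_ge i m with h | h
    · rw [if_pos (by omega), if_pos h]
    · rw [if_neg (by omega), if_neg (by omega)]
  · subst he; rw [if_pos (by omega), hv]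

theorem rList_set (nums : List Int) (k : Nat) (hk : k < nums.length) (v : Int)
    (hv : v = Rval nums (nums.length - 1 - k)) :
    (rList nums k).set (nums.length - 1 - k) v = rList nums (k+1) := by
  unfold rList
  refine set_map_range _ _ v (by omega) _ (fun i hi => ⟨fun hne => ?_, fun he => ?_⟩)
  · rcases Nat.lt_or_ge i (nums.length - k) with h | h
    · rw [if_neg (by omega), if_neg (by omega)]
    · rw [if_pos (by omega), if_pos h]
  · subst he; rw [if_pos (by omega), hv]

-- one step of A's left loop
theorem stepL_eq (nums : List Int) (m : Nat) (hm : m < nums.length) :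
    stepL nums (lList nums m, stkL nums m) (m : Int) = (lList nums (m+1), stkL nums (m+1)) := by
  have hnum : PySem.List.pyGetD nums (m : Int) 0 = nums.getD m 0 :=
    PySem.List.pyGetD_natCast nums m 0
  have hrun := stk_run nums m (nums.getD m 0)
  have hstk : stkL nums (m+1) = ((m : Int), nums.getD m 0) :: popWA (stkL nums m) (nums.getD m 0) := rfl
  revert hrun
  unfold stepL
  simp only [hnum, PySem.List.pySetD_natCast]
  cases hpp : popWA (stkL nums m) (nums.getD m 0) with
  | nil =>
    intro hrun
    simp only at hrun
    refine Prod.ext ?_ ?_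
    · show (lList nums m).set m (m : Int) = lList nums (m+1)
      exact lList_set nums m hm _ (by rw [Lval, hrun])
    · show ((m : Int), nums.getD m 0) :: [] = stkL nums (m+1)
      rw [hstk, hpp]
  | cons p t =>
    obtain ⟨j, v⟩ := p
    rintro ⟨h0, h1, h2⟩
    refine Prod.ext ?_ ?_
    · show (lList nums m).set m ((m : Int) - j - 1) = lList nums (m+1)
      exact lList_set nums m hm _ (by rw [Lval, h2])
    · show ((m : Int), nums.getD m 0) :: (j, v) :: t = stkL nums (m+1)
      rw [hstk, hpp]

theorem leftFold (nums : List Int) (m : Nat) (hm : m ≤ nums.length) :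
    (PySem.List.pyRange 0 (m : Int) 1).foldl (stepL nums) (List.replicate nums.length 0, []) =
      (lList nums m, stkL nums m) := by
  induction m with
  | zero => simp [PySem.List.pyRange_one_eq_nil, lList_zero, stkL]
  | succ m ih =>
    have h2 : ((m + 1 : Nat) : Int) = (m : Int) + 1 := by push_cast; ring
    rw [h2, PySem.List.pyRange_one_succ_right (by positivity), List.foldl_append,
      ih (by omega)]
    simpa using stepL_eq nums m (by omega)

-- index mapping of the right pass: stack entry (p, v) of the reverse-scan is (n-1-p, v)
def idxMap (n : Nat) (s : List (Int × Int)) : List (Int × Int) :=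
  s.map (fun p => ((n : Int) - 1 - p.1, p.2))

theorem getD_reverse (nums : List Int) (k : Nat) (hk : k < nums.length) :
    nums.reverse.getD k 0 = nums.getD (nums.length - 1 - k) 0 := by
  rw [List.getD_eq_getElem _ _ (by simpa), List.getD_eq_getElem _ _ (by omega),
    List.getElem_reverse]

theorem stepR_eq (nums : List Int) (k : Nat) (hk : k < nums.length) :
    stepR nums (nums.length : Int) (rList nums k, idxMap nums.length (stkL nums.reverse k))
        ((nums.length : Int) - 1 - (k : Int)) =
      (rList nums (k+1), idxMap nums.length (stkL nums.reverse (k+1))) := by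
  have hcast : (nums.length : Int) - 1 - (k : Int) = ((nums.length - 1 - k : Nat) : Int) := by
    omega
  have hnum : PySem.List.pyGetD nums ((nums.length : Int) - 1 - (k : Int)) 0
      = nums.reverse.getD k 0 := by
    rw [hcast, PySem.List.pyGetD_natCast, getD_reverse nums k hk]
  have hrun := stk_run nums.reverse k (nums.reverse.getD k 0)
  have hstk : stkL nums.reverse (k+1)
      = ((k : Int), nums.reverse.getD k 0) :: popWA (stkL nums.reverse k) (nums.reverse.getD k 0) := rfl
  have hmap : popWA (idxMap nums.length (stkL nums.reverse k)) (nums.reverse.getD k 0)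
      = idxMap nums.length (popWA (stkL nums.reverse k) (nums.reverse.getD k 0)) :=
    popWA_map _ _ _
  revert hrun
  unfold stepR
  simp only [hnum, hmap]
  cases hpp : popWA (stkL nums.reverse k) (nums.reverse.getD k 0) with
  | nil =>
    intro hrun
    simp only at hrun
    refine Prod.ext ?_ ?_
    · show PySem.List.pySetD (rList nums k) ((nums.length : Int) - 1 - (k : Int))
        ((nums.length : Int) - ((nums.length : Int) - 1 - (k : Int)) - 1) = rList nums (k+1)
      rw [hcast, PySem.List.pySetD_natCast]
      refine rList_set nums k hk _ ?_
      rw [Rval, show nums.length - 1 - (nums.length - 1 - k) = k by omega,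
        ← getD_reverse nums k hk, hrun]
      omega
    · show (((nums.length : Int) - 1 - (k : Int), nums.reverse.getD k 0) : Int × Int) :: idxMap nums.length []
        = idxMap nums.length (stkL nums.reverse (k+1))
      rw [hstk, hpp]; simp [idxMap]
  | cons p t =>
    obtain ⟨j, v⟩ := p
    rintro ⟨h0, h1, h2⟩
    refine Prod.ext ?_ ?_
    · show PySem.List.pySetD (rList nums k) ((nums.length : Int) - 1 - (k : Int))
        (((nums.length : Int) - 1 - j) - ((nums.length : Int) - 1 - (k : Int)) - 1) = rList nums (k+1)
      rw [hcast, PySem.List.pySetD_natCast]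
      refine rList_set nums k hk _ ?_
      rw [Rval, show nums.length - 1 - (nums.length - 1 - k) = k by omega,
        ← getD_reverse nums k hk, h2]
      omega
    · show (((nums.length : Int) - 1 - (k : Int), nums.reverse.getD k 0) : Int × Int)
          :: idxMap nums.length ((j, v) :: t) = idxMap nums.length (stkL nums.reverse (k+1))
      rw [hstk, hpp]; rfl

theorem rightFold (nums : List Int) (m : Nat) (hm : m ≤ nums.length) :
    (PySem.List.pyRange ((m : Int) - 1) (-1) (-1)).foldl (stepR nums (nums.length : Int))
        (rList nums (nums.length - m), idxMap nums.length (stkL nums.reverse (nums.length - m))) =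
      (rList nums nums.length, idxMap nums.length (stkL nums.reverse nums.length)) := by
  induction m with
  | zero =>
    rw [PySem.List.pyRange_neg_one_eq_nil (by norm_num)]
    simp
  | succ m ih =>
    have hk : nums.length - (m + 1) < nums.length := by omega
    have hidx : ((m + 1 : Nat) : Int) - 1
        = (nums.length : Int) - 1 - ((nums.length - (m + 1) : Nat) : Int) := by
      push_cast; omega
    rw [PySem.List.pyRange_neg_one_cons (by push_cast; omega), List.foldl_cons]
    have hstep := stepR_eq nums (nums.length - (m + 1)) hk
    rw [hidx, hstep, show nums.length - (m + 1) + 1 = nums.length - m by omega,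
      show ((nums.length : Int) - 1 - ((nums.length - (m + 1) : Nat) : Int) - 1)
        = ((m : Nat) : Int) - 1 by omega]
    exact ih (by omega)

-- takeWhile bridges between the two scan directions
theorem scanRight_takeWhile (x : Int) (l : List Int) :
    scanRight x l = ((l.takeWhile (fun v => v < x)).length : Int) := by
  induction l with
  | nil => simp [scanRight]
  | cons v t ih => by_cases hv : v < x <;> simp [scanRight, List.takeWhile, hv, ih]

theorem scanLeft_takeWhile (a : List Int) (x : Int) (k : Nat) (hk : k ≤ a.length) :
    scanLeft a x k = (((a.take k).reverse.takeWhile (fun v => v < x)).length : Int) := by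
  induction k with
  | zero => simp [scanLeft]
  | succ k ih =>
    have hk' : k < a.length := by omega
    have ht : (a.take (k+1)).reverse = a[k] :: (a.take k).reverse := by
      rw [List.take_add_one, List.getElem?_eq_getElem hk']
      simp
    have hscan : scanLeft a x (k+1) = if a.getD k 0 < x then scanLeft a x k + 1 else 0 := rfl
    have hget : a.getD k 0 = a[k] := List.getD_eq_getElem a 0 hk'
    rw [hscan, hget, ht]
    by_cases hv : a[k] < x
    · rw [if_pos hv, List.takeWhile_cons_of_pos (by simpa), ih (by omega)]
      simp only [List.length_cons]; push_cast; ring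
    · rw [if_neg hv, List.takeWhile_cons_of_neg (by simp only [decide_eq_true_eq]; exact hv)]
      simp

theorem Rval_eq_scanRight (nums : List Int) (i : Nat) (hi : i < nums.length) :
    Rval nums i = scanRight (nums.getD i 0) (nums.drop (i+1)) := by
  rw [Rval, scanLeft_takeWhile _ _ _ (by simp; omega), scanRight_takeWhile]
  congr 2
  rw [List.take_reverse]
  rw [show nums.length - (nums.length - 1 - i) = i + 1 by omega, List.reverse_reverse]

-- reading the finished arrays back
theorem getD_lList (nums : List Int) (i : Nat) (hi : i < nums.length) :
    (lList nums nums.length).getD i 0 = Lval nums i := by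
  rw [List.getD_eq_getElem _ _ (by simp [lList]; omega)]
  simp only [lList, List.getElem_map, List.getElem_range]
  rw [if_pos (by omega)]

theorem getD_rList (nums : List Int) (i : Nat) (hi : i < nums.length) :
    (rList nums nums.length).getD i 0 = Rval nums i := by
  rw [List.getD_eq_getElem _ _ (by simp [rList]; omega)]
  simp only [rList, List.getElem_map, List.getElem_range]
  rw [if_pos (by omega)]

-- the final loop of A builds exactly the map B builds
theorem final_eq (nums : List Int) :
    maximumLengthOfRanges nums
      = (List.range nums.length).map (fun i => 1 + Lval nums i + Rval nums i) := by
  unfold maximumLengthOfRanges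
  have hl := leftFold nums nums.length le_rfl
  have hr0 := rightFold nums nums.length le_rfl
  rw [Nat.sub_self, rList_zero] at hr0
  have hr0' : (PySem.List.pyRange ((nums.length : Int) - 1) (-1) (-1)).foldl
      (stepR nums (nums.length : Int)) (List.replicate nums.length 0, []) =
      (rList nums nums.length, idxMap nums.length (stkL nums.reverse nums.length)) := by
    rw [← hr0]; rfl
  simp only [hl, hr0']
  simp only [PySem.List.foldl_append_singleton_eq_map, List.nil_append,
    PySem.List.pyRange_zero_nat, List.map_map]
  refine List.map_congr_left (fun i hi => ?_)
  have hi' : i < nums.length := by simpa using hi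
  simp only [Function.comp_apply, PySem.List.pyGetD_natCast]
  rw [getD_lList nums i hi', getD_rList nums i hi']

theorem main_eq (nums : List Int) : maximumLengthOfRanges nums = maximumLengthOfRanges_alt nums := by
  rw [final_eq, maximumLengthOfRanges_alt]
  exact List.map_congr_left (fun i hi => by
    rw [Rval_eq_scanRight nums i (by simpa using hi)]; rfl)

-- ===== VERDICT (by name: the statement is the Claim_ definition above) =====
theorem maximumLengthOfRanges_spec : Claim_equal_maximumLengthOfRanges := by
  intro nums _
  exact main_eq nums
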